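-- pv_equiv track=rewrite | github.com/ezw678/CodeSignal | Arcade/Intro/Python/arcade_universe_intro.py | extract_each_kth_k_plus_1th
-- ===== SOURCE A (Python) =====
-- def extract_each_kth_k_plus_1th(nums, k):
--     n2 = []
--     i = 0
--     while i < len(nums):
--         if (i + 1) % k == 0:
--             i += 2
--             continue
--         else:
--             n2.append(nums[i])
--             i += 1
--
--     return n2
-- ===== SOURCE B (Python) =====
-- def extract_each_kth_k_plus_1th(nums, k):
--     # keep index i iff it is not of the form m*k-1 or m*k (m >= 1)
--     return [x for i, x in enumerate(nums)
--             if (i + 1) % k != 0 and (i % k != 0 or i == 0)]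
-- ===== Notes on version B (the rewrite author's own statement) =====
-- stated objective: simpler
-- what changed: Replaces A's jump-by-two while-pointer with a single comprehension over enumerate using the closed-form modular keep-predicate (index kept iff (i+1)%k != 0 and (i%k != 0 or i == 0)).
import Mathlib
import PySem

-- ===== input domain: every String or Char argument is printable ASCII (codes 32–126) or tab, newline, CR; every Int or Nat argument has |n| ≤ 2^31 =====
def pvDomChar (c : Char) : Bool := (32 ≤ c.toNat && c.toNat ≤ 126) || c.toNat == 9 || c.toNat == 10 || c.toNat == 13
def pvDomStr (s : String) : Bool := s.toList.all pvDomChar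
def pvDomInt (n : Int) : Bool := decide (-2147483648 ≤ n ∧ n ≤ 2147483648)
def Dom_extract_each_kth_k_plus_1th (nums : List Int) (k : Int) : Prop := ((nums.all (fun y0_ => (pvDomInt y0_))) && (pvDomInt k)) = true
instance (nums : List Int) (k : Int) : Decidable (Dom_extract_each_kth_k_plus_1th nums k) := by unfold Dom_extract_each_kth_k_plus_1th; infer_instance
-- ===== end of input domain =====

-- B replaces A's jump-by-two while-pointer with one filter over enumerate using the
-- closed-form modular keep-predicate; objective: simpler, same O(n) cost.


-- ===== PORT A =====
-- while loop with pointer i and accumulator n2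
def pvALoop (nums : List Int) (k : Int) (i : Nat) (n2 : List Int) : List Int :=
  if h : i < nums.length then
    if PySem.Int.mod ((i : Int) + 1) k = 0 then
      pvALoop nums k (i + 2) n2
    else
      pvALoop nums k (i + 1) (n2 ++ [nums[i]])
  else n2
termination_by nums.length - i

def extract_each_kth_k_plus_1th (nums : List Int) (k : Int) : List Int :=
  pvALoop nums k 0 []

-- ===== PORT B =====
def pvKeep (k : Int) (p : Int × Int) : Bool :=
  decide (PySem.Int.mod (p.1 + 1) k ≠ 0) && (decide (PySem.Int.mod p.1 k ≠ 0) || decide (p.1 = 0))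

def extract_each_kth_k_plus_1th_alt (nums : List Int) (k : Int) : List Int :=
  ((PySem.List.enumerate nums 0).filter (pvKeep k)).map (·.2)

-- ===== PRECONDITION & SPEC =====
-- Pre_ excludes exactly the inputs where Python A raises ZeroDivisionError: k = 0 with a non-empty list.
def Pre_extract_each_kth_k_plus_1th (nums : List Int) (k : Int) : Prop := nums = [] ∨ k ≠ 0
instance (nums : List Int) (k : Int) : Decidable (Pre_extract_each_kth_k_plus_1th nums k) := by unfold Pre_extract_each_kth_k_plus_1th; infer_instance
def pvWitness_extract_each_kth_k_plus_1th : List Int × Int := ([10, 20, 30, 40, 50, 60, 70], 3)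

def Spec_extract_each_kth_k_plus_1th (nums : List Int) (k : Int) (out : List Int) : Prop := out = extract_each_kth_k_plus_1th_alt nums k
instance (nums : List Int) (k : Int) (out : List Int) : Decidable (Spec_extract_each_kth_k_plus_1th nums k out) := by unfold Spec_extract_each_kth_k_plus_1th; infer_instance

-- ===== CLAIM (what is proved, stated in full; the proofs are below) =====
def Claim_equal_extract_each_kth_k_plus_1th : Prop := ∀ (nums : List Int) (k : Int), Dom_extract_each_kth_k_plus_1th nums k → Pre_extract_each_kth_k_plus_1th nums k → Spec_extract_each_kth_k_plus_1th nums k (extract_each_kth_k_plus_1th nums k)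

-- ===== LEMMAS AND PROOFS =====

theorem pvEnum_drop_cons (nums : List Int) (i : Nat) (h : i < nums.length) :
    (PySem.List.enumerate nums 0).drop i
      = ((i : Int), nums[i]) :: (PySem.List.enumerate nums 0).drop (i + 1) := by
  have hl : i < (PySem.List.enumerate nums 0).length := by
    simpa [PySem.List.length_enumerate] using h
  rw [List.drop_eq_getElem_cons hl]
  simp [PySem.List.getElem_enumerate]

theorem pvALoop_eq (nums : List Int) (k : Int) :
    ∀ cnt i n2, nums.length - i ≤ cnt →
      (i = 0 ∨ ¬ k ∣ (i : Int) ∨ k ∣ 1) →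
      pvALoop nums k i n2
        = n2 ++ (((PySem.List.enumerate nums 0).drop i).filter (pvKeep k)).map (·.2) := by
  intro cnt
  induction cnt with
  | zero =>
      intro i n2 hle _
      have hge : nums.length ≤ i := by omega
      rw [pvALoop,
        List.drop_eq_nil_of_le (by simpa [PySem.List.length_enumerate] using hge)]
      simp [Nat.not_lt.mpr hge]
  | succ m ih =>
      intro i n2 hle hinv
      rw [pvALoop]
      by_cases h : i < nums.length
      · simp only [h, dif_pos]
        by_cases hm : PySem.Int.mod ((i : Int) + 1) k = 0
        · -- skip i and i+1
          have hdvd1 : k ∣ ((i : Int) + 1) := (PySem.Int.mod_eq_zero_iff_dvd _ _).mp hm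
          simp only [hm]
          have hinv2 : (i + 2 = 0 ∨ ¬ k ∣ ((i : Nat) + 2 : Int) ∨ k ∣ 1) := by
            by_cases hd2 : k ∣ ((i : Nat) + 2 : Int)
            · right; right
              have : ((i : Nat) + 2 : Int) - ((i : Int) + 1) = 1 := by ring
              calc k ∣ ((i : Nat) + 2 : Int) - ((i : Int) + 1) := dvd_sub hd2 hdvd1
                _ = 1 := this
            · right; left; exact hd2
          have hrec := ih (i + 2) n2 (by omega) hinv2
          rw [hrec]
          -- show the filtered drops agree
          have hkeepi : pvKeep k ((i : Int), nums[i]) = false := by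
            simp [pvKeep, hm]
          rw [pvEnum_drop_cons nums i h]
          by_cases h1 : i + 1 < nums.length
          · have hkeepi1 : pvKeep k (((i + 1 : Nat) : Int), nums[i+1]) = false := by
              have : PySem.Int.mod (((i + 1 : Nat) : Int)) k = 0 := by
                push_cast; simpa using hm
              simp [pvKeep]
              omega
            rw [pvEnum_drop_cons nums (i + 1) h1]
            simp only [List.filter_cons, hkeepi, hkeepi1]
            norm_num
          · have hnil1 : (PySem.List.enumerate nums 0).drop (i + 1) = [] :=
              List.drop_eq_nil_of_le (by simp [PySem.List.length_enumerate]; omega)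
            have hnil2 : (PySem.List.enumerate nums 0).drop (i + 2) = [] :=
              List.drop_eq_nil_of_le (by simp [PySem.List.length_enumerate]; omega)
            simp [hkeepi, hnil1, hnil2]
        · -- keep i
          have hnot1 : ¬ k ∣ ((i : Int) + 1) := fun hd =>
            hm ((PySem.Int.mod_eq_zero_iff_dvd _ _).mpr hd)
          simp only [hm]
          have hinv2 : (i + 1 = 0 ∨ ¬ k ∣ ((i : Nat) + 1 : Int) ∨ k ∣ 1) := by
            right; left; exact_mod_cast hnot1
          have hrec := ih (i + 1) (n2 ++ [nums[i]]) (by omega) hinv2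
          rw [hrec]
          have hkeepi : pvKeep k ((i : Int), nums[i]) = true := by
            rcases hinv with h0 | hnd | h1
            · subst h0; simp only [pvKeep]; simp; simpa using hm
            · have : PySem.Int.mod ((i : Int)) k ≠ 0 := fun hz =>
                hnd ((PySem.Int.mod_eq_zero_iff_dvd _ _).mp hz)
              simp [pvKeep, hm, this]
            · exact absurd (Dvd.dvd.trans h1 ⟨(i : Int) + 1, by ring⟩) hnot1
          rw [pvEnum_drop_cons nums i h]
          simp [hkeepi]
      · simp only [h, dif_neg, not_false_iff]
        have hnil : (PySem.List.enumerate nums 0).drop i = [] :=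
          List.drop_eq_nil_of_le (by simp [PySem.List.length_enumerate]; omega)
        simp [hnil]

-- ===== VERDICT (by name: the statement is the Claim_ definition above) =====
theorem extract_each_kth_k_plus_1th_spec : Claim_equal_extract_each_kth_k_plus_1th := by
  intro nums k _ hpre
  unfold Spec_extract_each_kth_k_plus_1th extract_each_kth_k_plus_1th extract_each_kth_k_plus_1th_alt
  rcases hpre with hnil | hk
  · subst hnil
    rw [pvALoop]
    simp [PySem.List.enumerate]
  · rw [pvALoop_eq nums k nums.length 0 [] (by omega) (Or.inl rfl)]
    simp
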